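-- pv_equiv track=rewrite | github.com/akTurn/test_ | Doc_ChessAPI/app/chess_moves2.py | calculate_knight_moves
-- ===== SOURCE A (Python) =====
-- board = ['a1', 'a2', 'a3', 'a4', 'a5', 'a6', 'a7', 'a8',
--          'b1', 'b2', 'b3', 'b4', 'b5', 'b6', 'b7', 'b8',
--          'c1', 'c2', 'c3', 'c4', 'c5', 'c6', 'c7', 'c8',
--          'd1', 'd2', 'd3', 'd4', 'd5', 'd6', 'd7', 'd8',
--          'e1', 'e2', 'e3', 'e4', 'e5', 'e6', 'e7', 'e8',
--          'f1', 'f2', 'f3', 'f4', 'f5', 'f6', 'f7', 'f8',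
--          'g1', 'g2', 'g3', 'g4', 'g5', 'g6', 'g7', 'g8',
--          'h1', 'h2', 'h3', 'h4', 'h5', 'h6', 'h7', 'h8']
--
-- def calculate_knight_moves(current_position, positions):
--     valid_moves = []
--     possible_moves = [
--         (2, 1), (1, 2),
--         (-2, 1), (-1, 2),
--         (2, -1), (1, -2),
--         (-2, -1), (-1, -2)
--     ]
--     row, col = current_position[0], int(current_position[1])
--     for move in possible_moves:
--         new_row = chr(ord(row) + move[0])
--         new_col = col + move[1]
--         new_position = new_row + str(new_col)
--         if new_position in board:
--             valid_moves.append(new_position)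
--     for piece_slug, piece_position in positions.items():
--         if piece_slug != "Knight":
--             valid_moves = filter_moves_for_obstacles(valid_moves, piece_position, current_position)
--     return valid_moves
--
-- def filter_moves_for_obstacles(valid_moves, obstacle_position, current_position):
--     obstacle_position = obstacle_position.lower()
--     if is_diagonal(current_position, obstacle_position):
--         valid_moves = [move for move in valid_moves if not is_diagonal(current_position, move)]
--     elif current_position[0] == obstacle_position[0]:
--         valid_moves = [move for move in valid_moves if current_position[0] != move[0]]
--     elif current_position[1] == obstacle_position[1]:
--         valid_moves = [move for move in valid_moves if current_position[1] != move[1]]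
--     return valid_moves
--
-- def is_diagonal(position1, position2):
--     return abs(ord(position1[0]) - ord(position2[0])) == abs(int(position1[1]) - int(position2[1]))
-- ===== SOURCE B (Python) =====
-- # B: one pass over positions accumulating three drop-flags (diagonal/file/rank),
-- # then one pass over the 8 knight offsets filtered by those flags, instead of
-- # A's per-obstacle rebuilding of the valid-move list.
-- board = ['a1', 'a2', 'a3', 'a4', 'a5', 'a6', 'a7', 'a8',
--          'b1', 'b2', 'b3', 'b4', 'b5', 'b6', 'b7', 'b8',
--          'c1', 'c2', 'c3', 'c4', 'c5', 'c6', 'c7', 'c8',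
--          'd1', 'd2', 'd3', 'd4', 'd5', 'd6', 'd7', 'd8',
--          'e1', 'e2', 'e3', 'e4', 'e5', 'e6', 'e7', 'e8',
--          'f1', 'f2', 'f3', 'f4', 'f5', 'f6', 'f7', 'f8',
--          'g1', 'g2', 'g3', 'g4', 'g5', 'g6', 'g7', 'g8',
--          'h1', 'h2', 'h3', 'h4', 'h5', 'h6', 'h7', 'h8']
--
--
-- def _diag(p, q):
--     return abs(ord(p[0]) - ord(q[0])) == abs(int(p[1]) - int(q[1]))
--
--
-- def _update_flags(flags, cur, obstacle):
--     ob = obstacle.lower()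
--     if _diag(cur, ob):
--         return (True, flags[1], flags[2])
--     if cur[0] == ob[0]:
--         return (flags[0], True, flags[2])
--     if cur[1] == ob[1]:
--         return (flags[0], flags[1], True)
--     return flags
--
--
-- def _removed(flags, cur, m):
--     return ((flags[0] and _diag(cur, m))
--             or (flags[1] and cur[0] == m[0])
--             or (flags[2] and cur[1] == m[1]))
--
--
-- def calculate_knight_moves(current_position, positions):
--     row, col = current_position[0], int(current_position[1])
--     flags = (False, False, False)
--     for slug, pos in positions.items():
--         if slug == "Knight":
--             continue
--         flags = _update_flags(flags, current_position, pos)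
--     result = []
--     for dr, dc in [(2, 1), (1, 2), (-2, 1), (-1, 2),
--                    (2, -1), (1, -2), (-2, -1), (-1, -2)]:
--         move = chr(ord(row) + dr) + str(col + dc)
--         if move in board and not _removed(flags, current_position, move):
--             result.append(move)
--     return result
-- ===== Notes on version B (the rewrite author's own statement) =====
-- stated objective: alternative
-- what changed: Instead of A's obstacle-outer loop that rebuilds the valid-move list once per non-Knight piece, B makes one pass over positions accumulating three boolean drop-flags (diagonal/same-file/same-rank) and then a single pass over the 8 knight offsets keeping each on-board move not matched by any active flag.
import Mathlib
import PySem

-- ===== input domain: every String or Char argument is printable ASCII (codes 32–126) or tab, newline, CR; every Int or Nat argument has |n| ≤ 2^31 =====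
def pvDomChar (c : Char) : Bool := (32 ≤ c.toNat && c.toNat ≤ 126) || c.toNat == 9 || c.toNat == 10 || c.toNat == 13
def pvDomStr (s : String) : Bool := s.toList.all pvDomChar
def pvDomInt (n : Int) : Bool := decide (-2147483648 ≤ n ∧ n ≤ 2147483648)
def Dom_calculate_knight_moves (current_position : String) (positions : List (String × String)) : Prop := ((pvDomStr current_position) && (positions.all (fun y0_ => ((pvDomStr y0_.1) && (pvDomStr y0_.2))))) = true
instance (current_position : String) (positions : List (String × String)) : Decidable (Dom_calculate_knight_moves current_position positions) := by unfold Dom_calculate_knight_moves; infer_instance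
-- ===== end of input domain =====

-- B replaces A's per-obstacle rebuilding of the move list by one flag-accumulating
-- pass over positions plus one flag-filtered pass over the 8 offsets (alternative
-- decomposition, no speed claim).

-- shared primitives, mirroring the Python expressions s[i], int(c), chr(n), is_diagonal
def pvChar (s : String) (i : Int) : Char := (PySem.Str.pyGet? s i).getD ' '
def pvDigitVal (c : Char) : Int := (c.toNat : Int) - 48   -- int(c) for a digit char (Pre_ guarantees digits)
def pvChr (n : Int) : Char := Char.ofNat n.toNat          -- chr(n), exact for the ASCII range used here
def pvIsDiagonal (p1 p2 : String) : Bool :=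
  (((pvChar p1 0).toNat : Int) - ((pvChar p2 0).toNat : Int)).natAbs
    == (pvDigitVal (pvChar p1 1) - pvDigitVal (pvChar p2 1)).natAbs

def pvBoard : List String :=
  ["a1","a2","a3","a4","a5","a6","a7","a8","b1","b2","b3","b4","b5","b6","b7","b8",
   "c1","c2","c3","c4","c5","c6","c7","c8","d1","d2","d3","d4","d5","d6","d7","d8",
   "e1","e2","e3","e4","e5","e6","e7","e8","f1","f2","f3","f4","f5","f6","f7","f8",
   "g1","g2","g3","g4","g5","g6","g7","g8","h1","h2","h3","h4","h5","h6","h7","h8"]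

def pvMoves : List (Int × Int) := [(2,1),(1,2),(-2,1),(-1,2),(2,-1),(1,-2),(-2,-1),(-1,-2)]

-- ===== PORT A =====
def pvFilterMovesForObstacles (valid_moves : List String) (obstacle_position current_position : String) : List String :=
  let ob := PySem.Str.lower obstacle_position
  if pvIsDiagonal current_position ob then
    valid_moves.filter (fun m => !pvIsDiagonal current_position m)
  else if pvChar current_position 0 == pvChar ob 0 then
    valid_moves.filter (fun m => !(pvChar current_position 0 == pvChar m 0))
  else if pvChar current_position 1 == pvChar ob 1 then
    valid_moves.filter (fun m => !(pvChar current_position 1 == pvChar m 1))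
  else valid_moves

def calculate_knight_moves (current_position : String) (positions : List (String × String)) : List String :=
  let row := pvChar current_position 0
  let col := pvDigitVal (pvChar current_position 1)
  let valid_moves := pvMoves.foldl (fun acc mv =>
    let np := (pvChr ((row.toNat : Int) + mv.1)).toString ++ PySem.Int.toStr (col + mv.2)
    if pvBoard.contains np then acc ++ [np] else acc) []
  positions.foldl (fun vm pr =>
    if pr.1 != "Knight" then pvFilterMovesForObstacles vm pr.2 current_position else vm) valid_moves

-- ===== PORT B =====
def pvUpdateFlags (flags : Bool × Bool × Bool) (cur obstacle : String) : Bool × Bool × Bool :=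
  let ob := PySem.Str.lower obstacle
  if pvIsDiagonal cur ob then (true, flags.2.1, flags.2.2)
  else if pvChar cur 0 == pvChar ob 0 then (flags.1, true, flags.2.2)
  else if pvChar cur 1 == pvChar ob 1 then (flags.1, flags.2.1, true)
  else flags

def pvRemoved (flags : Bool × Bool × Bool) (cur m : String) : Bool :=
  (flags.1 && pvIsDiagonal cur m) || (flags.2.1 && (pvChar cur 0 == pvChar m 0))
    || (flags.2.2 && (pvChar cur 1 == pvChar m 1))

def calculate_knight_moves_alt (current_position : String) (positions : List (String × String)) : List String :=
  let row := pvChar current_position 0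
  let col := pvDigitVal (pvChar current_position 1)
  let flags := positions.foldl (fun f pr =>
    if pr.1 == "Knight" then f else pvUpdateFlags f current_position pr.2) (false, false, false)
  pvMoves.foldl (fun acc mv =>
    let move := (pvChr ((row.toNat : Int) + mv.1)).toString ++ PySem.Int.toStr (col + mv.2)
    if pvBoard.contains move && !pvRemoved flags current_position move then acc ++ [move] else acc) []

-- ===== PRECONDITION & SPEC =====
-- Pre_ = exactly where Python A returns: current_position has a char at index 1 and it is
-- a decimal digit (else IndexError/ValueError), and every non-Knight piece position has a
-- char at index 1 and it is a decimal digit (else is_diagonal raises on it).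
def pvDigitAt1 (s : String) : Prop :=
  2 ≤ s.toList.length ∧ ('0' ≤ pvChar s 1 ∧ pvChar s 1 ≤ '9')

def Pre_calculate_knight_moves (current_position : String) (positions : List (String × String)) : Prop :=
  pvDigitAt1 current_position ∧ ∀ pr ∈ positions, pr.1 ≠ "Knight" → pvDigitAt1 pr.2
instance (current_position : String) (positions : List (String × String)) : Decidable (Pre_calculate_knight_moves current_position positions) := by
  unfold Pre_calculate_knight_moves pvDigitAt1; infer_instance

def pvWitness_calculate_knight_moves : String × (List (String × String)) := ("d4", [("Rook", "d7")])

def Spec_calculate_knight_moves (current_position : String) (positions : List (String × String)) (out : List String) : Prop := out = calculate_knight_moves_alt current_position positions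
instance (current_position : String) (positions : List (String × String)) (out : List String) : Decidable (Spec_calculate_knight_moves current_position positions out) := by unfold Spec_calculate_knight_moves; infer_instance

-- ===== CLAIM (what is proved, stated in full; the proofs are below) =====
def Claim_equal_calculate_knight_moves : Prop := ∀ (current_position : String) (positions : List (String × String)), Dom_calculate_knight_moves current_position positions → Pre_calculate_knight_moves current_position positions → Spec_calculate_knight_moves current_position positions (calculate_knight_moves current_position positions)

-- ===== LEMMAS AND PROOFS =====

-- proof-side abbreviations
def pvNp (cp : String) (mv : Int × Int) : String :=
  (pvChr (((pvChar cp 0).toNat : Int) + mv.1)).toString ++ PySem.Int.toStr (pvDigitVal (pvChar cp 1) + mv.2)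

def pvStepA (cp : String) (vm : List String) (pr : String × String) : List String :=
  if pr.1 != "Knight" then pvFilterMovesForObstacles vm pr.2 cp else vm

def pvStepF (cp : String) (f : Bool × Bool × Bool) (pr : String × String) : Bool × Bool × Bool :=
  if pr.1 == "Knight" then f else pvUpdateFlags f cp pr.2

lemma portA_eq (cp : String) (ps : List (String × String)) :
    calculate_knight_moves cp ps
      = ps.foldl (pvStepA cp)
          (pvMoves.foldl (fun acc mv => if pvBoard.contains (pvNp cp mv) then acc ++ [pvNp cp mv] else acc) []) := rfl

lemma portB_eq (cp : String) (ps : List (String × String)) :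
    calculate_knight_moves_alt cp ps
      = pvMoves.foldl (fun acc mv =>
          if pvBoard.contains (pvNp cp mv)
              && !pvRemoved (ps.foldl (pvStepF cp) (false, false, false)) cp (pvNp cp mv)
          then acc ++ [pvNp cp mv] else acc) [] := rfl

lemma stepA_eq_filter (cp : String) (pr : String × String) (vm : List String) :
    pvStepA cp vm pr
      = vm.filter (fun m => !pvRemoved (pvStepF cp (false, false, false) pr) cp m) := by
  unfold pvStepA pvStepF pvUpdateFlags pvFilterMovesForObstacles pvRemoved
  cases hk : pr.1 == "Knight"
  · simp only [hk, bne, Bool.not_false, if_true]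
    by_cases h1 : pvIsDiagonal cp (PySem.Str.lower pr.2) = true
    · simp [h1]
    · by_cases h2 : (pvChar cp 0 == pvChar (PySem.Str.lower pr.2) 0) = true
      · simp [h1, h2]
      · by_cases h3 : (pvChar cp 1 == pvChar (PySem.Str.lower pr.2) 1) = true
        · simp [h1, h2, h3]
        · simp [h1, h2, h3]
  · have hk' : pr.1 = "Knight" := by simpa using hk
    simp [hk']

lemma step_pointwise (cp : String) (pr : String × String) (f : Bool × Bool × Bool) (m : String) :
    (!pvRemoved (pvStepF cp (false, false, false) pr) cp m && !pvRemoved f cp m)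
      = !pvRemoved (pvStepF cp f pr) cp m := by
  obtain ⟨a, b, c⟩ := f
  unfold pvStepF pvUpdateFlags pvRemoved
  cases hk : pr.1 == "Knight" <;> simp only [if_true] <;>
    [skip; (cases a <;> cases b <;> cases c <;> simp)]
  split_ifs with h1 h2 h3 <;>
    cases hd : pvIsDiagonal cp m <;>
    cases hf : pvChar cp 0 == pvChar m 0 <;>
    cases hr : pvChar cp 1 == pvChar m 1 <;>
    cases a <;> cases b <;> cases c <;> simp

lemma main_fold (cp : String) (ps : List (String × String)) (f : Bool × Bool × Bool) (vm : List String) :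
    ps.foldl (pvStepA cp) (vm.filter (fun m => !pvRemoved f cp m))
      = vm.filter (fun m => !pvRemoved (ps.foldl (pvStepF cp) f) cp m) := by
  induction ps generalizing f with
  | nil => rfl
  | cons pr ps ih =>
      simp only [List.foldl_cons]
      rw [stepA_eq_filter, List.filter_filter]
      rw [List.filter_congr (fun m _ => step_pointwise cp pr f m)]
      exact ih _

lemma build_filter (c : String → Bool) (p : String → Bool) (g : Int × Int → String)
    (l : List (Int × Int)) (s : List String) :
    (l.foldl (fun acc mv => if c (g mv) then acc ++ [g mv] else acc) s).filter p
      = l.foldl (fun acc mv => if c (g mv) && p (g mv) then acc ++ [g mv] else acc) (s.filter p) := by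
  induction l generalizing s with
  | nil => rfl
  | cons mv l ih =>
      simp only [List.foldl_cons]
      rw [ih]
      congr 1
      by_cases h : c (g mv) = true
      · by_cases hp : p (g mv) = true
        · simp [h, hp, List.filter_append]
        · simp [h, Bool.eq_false_iff.mpr hp, List.filter_append]
      · simp [Bool.eq_false_iff.mpr h]

-- ===== VERDICT (by name: the statement is the Claim_ definition above) =====
theorem calculate_knight_moves_spec : Claim_equal_calculate_knight_moves := by
  intro cp ps _ _
  unfold Spec_calculate_knight_moves
  rw [portA_eq, portB_eq]
  have hcand : (pvMoves.foldl (fun acc mv => if pvBoard.contains (pvNp cp mv) then acc ++ [pvNp cp mv] else acc) [])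
      = (pvMoves.foldl (fun acc mv => if pvBoard.contains (pvNp cp mv) then acc ++ [pvNp cp mv] else acc) []).filter
          (fun m => !pvRemoved (false, false, false) cp m) := by
    simp [pvRemoved]
  rw [hcand, main_fold,
    build_filter pvBoard.contains
      (fun m => !pvRemoved (ps.foldl (pvStepF cp) (false, false, false)) cp m) (pvNp cp) pvMoves []]
  rfl
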